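-- pv_equiv track=rewrite | github.com/88lin/boss-agent-cli | src/boss_agent_cli/search_filters.py | match_all_welfare
-- ===== SOURCE A (Python) =====
-- def _check_welfare_in_text(keywords: list[str], text: str) -> bool:
-- 	return any(kw in text for kw in keywords)
--
-- def match_all_welfare(
-- 	conditions: list[tuple[str, list[str]]],
-- 	welfare_list: list[str],
-- 	description: str,
-- ) -> list[str]:
-- 	"""Check all welfare conditions (AND). Returns match descriptions or empty list."""
-- 	text = " ".join(welfare_list)
-- 	full_text = text + " " + description
-- 	results = []
-- 	for label, keywords in conditions:
-- 		if _check_welfare_in_text(keywords, text):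
-- 			results.append(f"{label}(标签)")
-- 		elif description and _check_welfare_in_text(keywords, full_text):
-- 			results.append(f"{label}(描述)")
-- 		else:
-- 			return []
-- 	return results
-- ===== SOURCE B (Python) =====
-- def match_all_welfare(
-- 	conditions: list[tuple[str, list[str]]],
-- 	welfare_list: list[str],
-- 	description: str,
-- ) -> list[str]:
-- 	"""Check all welfare conditions (AND). Returns match descriptions or empty list."""
-- 	text = " ".join(welfare_list)
-- 	full_text = text + " " + description
--
-- 	def satisfied(keywords: list[str]) -> bool:
-- 		return any(kw in text for kw in keywords) or (
-- 			bool(description) and any(kw in full_text for kw in keywords)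
-- 		)
--
-- 	# staged passes: first decide the AND over all conditions, then (only if it
-- 	# holds) build the whole result list in one comprehension -- no accumulator,
-- 	# no early-return interleaved with list building.
-- 	if all(satisfied(kws) for _, kws in conditions):
-- 		return [
-- 			label + ("(标签)" if any(kw in text for kw in kws) else "(描述)")
-- 			for label, kws in conditions
-- 		]
-- 	return []
-- ===== Notes on version B (the rewrite author's own statement) =====
-- stated objective: simpler
-- what changed: A builds the result list in one loop with an accumulator and an early return on the first failing condition; B uses two staged passes with no accumulator: an all() pass deciding the AND over every condition, then a list comprehension that builds every tag only if the AND holds.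
import Mathlib
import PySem

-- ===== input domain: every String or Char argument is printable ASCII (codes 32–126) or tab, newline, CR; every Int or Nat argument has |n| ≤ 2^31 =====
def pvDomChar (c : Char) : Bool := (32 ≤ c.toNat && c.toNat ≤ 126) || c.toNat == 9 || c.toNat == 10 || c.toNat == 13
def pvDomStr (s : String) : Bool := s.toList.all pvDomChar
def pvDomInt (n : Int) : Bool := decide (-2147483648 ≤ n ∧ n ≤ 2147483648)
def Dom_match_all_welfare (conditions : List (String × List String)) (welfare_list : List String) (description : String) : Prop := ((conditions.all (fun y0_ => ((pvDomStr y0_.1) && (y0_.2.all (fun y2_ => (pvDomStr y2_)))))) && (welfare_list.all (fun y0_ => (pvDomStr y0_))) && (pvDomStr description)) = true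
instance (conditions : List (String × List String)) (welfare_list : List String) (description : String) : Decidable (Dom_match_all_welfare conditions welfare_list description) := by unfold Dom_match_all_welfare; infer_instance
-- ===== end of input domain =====

-- B replaces A's accumulator loop with early return by two staged passes (an all() check
-- over every condition, then a map building the tags); simpler decomposition, same cost.


-- ===== PORT A =====
-- any(kw in text for kw in keywords)
def checkWelfareInText (keywords : List String) (text : String) : Bool :=
  keywords.any (fun kw => PySem.Str.isIn kw text)

-- A's for-loop over conditions, accumulating `results`; early `return []`
def matchAllLoopA (text full_text description : String) :
    List (String × List String) → List String → List String
  | [], results => results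
  | (label, keywords) :: rest, results =>
    if checkWelfareInText keywords text then
      matchAllLoopA text full_text description rest (results ++ [label ++ "(标签)"])
    else if description ≠ "" ∧ checkWelfareInText keywords full_text then
      matchAllLoopA text full_text description rest (results ++ [label ++ "(描述)"])
    else []

def match_all_welfare (conditions : List (String × List String)) (welfare_list : List String) (description : String) : List String :=
  let text := PySem.Str.join " " welfare_list
  let full_text := text ++ " " ++ description
  matchAllLoopA text full_text description conditions []

-- ===== PORT B =====
-- B's satisfied(keywords)
def satisfiedB (text full_text description : String) (keywords : List String) : Bool :=
  keywords.any (fun kw => PySem.Str.isIn kw text) ||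
    ((!(description == "")) && keywords.any (fun kw => PySem.Str.isIn kw full_text))

-- B: staged passes — decide the AND first, then build every tag with a map
def match_all_welfare_alt (conditions : List (String × List String)) (welfare_list : List String) (description : String) : List String :=
  let text := PySem.Str.join " " welfare_list
  let full_text := text ++ " " ++ description
  if conditions.all (fun c => satisfiedB text full_text description c.2) then
    conditions.map (fun c =>
      c.1 ++ (if c.2.any (fun kw => PySem.Str.isIn kw text) then "(标签)" else "(描述)"))
  else []

-- ===== PRECONDITION & SPEC =====
def Spec_match_all_welfare (conditions : List (String × List String)) (welfare_list : List String) (description : String) (out : List String) : Prop := out = match_all_welfare_alt conditions welfare_list description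
instance (conditions : List (String × List String)) (welfare_list : List String) (description : String) (out : List String) : Decidable (Spec_match_all_welfare conditions welfare_list description out) := by unfold Spec_match_all_welfare; infer_instance

-- ===== CLAIM (what is proved, stated in full; the proofs are below) =====
def Claim_equal_match_all_welfare : Prop := ∀ (conditions : List (String × List String)) (welfare_list : List String) (description : String), Dom_match_all_welfare conditions welfare_list description → Spec_match_all_welfare conditions welfare_list description (match_all_welfare conditions welfare_list description)

-- ===== LEMMAS AND PROOFS =====

-- Characterisation of A's loop: it returns the accumulated results followed by all
-- tags iff every condition is satisfied, and [] otherwise.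
theorem anyB_eq (kws : List String) (t : String) :
    kws.any (fun kw => PySem.Str.isIn kw t) = checkWelfareInText kws t := rfl

theorem loopA_char (text full_text description : String)
    (conds : List (String × List String)) (results : List String) :
    matchAllLoopA text full_text description conds results =
      (if conds.all (fun c => satisfiedB text full_text description c.2) then
        results ++ conds.map (fun c =>
          c.1 ++ (if c.2.any (fun kw => PySem.Str.isIn kw text) then "(标签)" else "(描述)"))
      else []) := by
  induction conds generalizing results with
  | nil => simp [matchAllLoopA]
  | cons c rest ih =>
    obtain ⟨label, keywords⟩ := c
    simp only [matchAllLoopA, List.all_cons, List.map_cons, anyB_eq]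
    by_cases ht : checkWelfareInText keywords text = true
    · have hs : satisfiedB text full_text description keywords = true := by
        unfold satisfiedB; rw [anyB_eq, ht, Bool.true_or]
      rw [if_pos ht, ih, hs]
      simp only [Bool.true_and]
      split_ifs with h
      · simp only [anyB_eq, List.append_assoc, List.singleton_append]
      · rfl
    · rw [if_neg ht]
      have ht : checkWelfareInText keywords text = false := by simpa using ht
      by_cases hd : description ≠ "" ∧ checkWelfareInText keywords full_text = true
      · have hs : satisfiedB text full_text description keywords = true := by
          unfold satisfiedB
          rw [anyB_eq, ht, Bool.false_or, anyB_eq, hd.2, Bool.and_true]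
          simpa using hd.1
        rw [if_pos hd, ih, hs]
        simp only [Bool.true_and]
        split_ifs with h
        · simp only [anyB_eq, List.append_assoc, List.singleton_append]
        · rfl
      · have hs : satisfiedB text full_text description keywords = false := by
          unfold satisfiedB
          rw [anyB_eq, ht, Bool.false_or, anyB_eq]
          by_cases hde : description = ""
          · simp [hde]
          · have hcf : checkWelfareInText keywords full_text = false := by
              rcases Bool.eq_false_or_eq_true (checkWelfareInText keywords full_text) with h | h
              · exact absurd ⟨hde, h⟩ hd
              · exact h
            simp [hcf]
        rw [if_neg hd, hs]
        simp

-- ===== VERDICT (by name: the statement is the Claim_ definition above) =====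
theorem match_all_welfare_spec : Claim_equal_match_all_welfare := by
  intro conditions welfare_list description _
  unfold Spec_match_all_welfare match_all_welfare match_all_welfare_alt
  simp only [loopA_char, List.nil_append]
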